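-- pv_equiv track=rewrite | github.com/reccli/reccli | packages/reccli/retrieval/search.py | apply_scope_filter
-- ===== SOURCE A (Python) =====
-- from typing import List, Dict, Optional, Tuple
--
-- def apply_scope_filter(results: List[Dict], scope_filter: Dict) -> List[Dict]:
--     """
--     Apply scope filters to search results
--
--     Supported filters:
--     - session_id: Filter to specific session
--     - section: Filter to specific section
--     - episode_id: Filter to specific episode
--
--     Args:
--         results: Search results
--         scope_filter: Scope filter specification
--
--     Returns:
--         Filtered results
--     """
--     filtered = results
--
--     if 'session_id' in scope_filter:
--         session_id = scope_filter['session_id']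
--         filtered = [r for r in filtered if r.get('session') == session_id]
--
--     if 'section' in scope_filter:
--         section = scope_filter['section']
--         filtered = [r for r in filtered if r.get('section') == section]
--
--     if 'episode_id' in scope_filter:
--         episode_id = scope_filter['episode_id']
--         filtered = [r for r in filtered if r.get('episode_id') == episode_id]
--
--     return filtered
-- ===== SOURCE B (Python) =====
-- def apply_scope_filter(results, scope_filter):
--     """Filter results by the present scope keys in one combined pass."""
--     key_to_field = (('session_id', 'session'),
--                     ('section', 'section'),
--                     ('episode_id', 'episode_id'))
--     checks = [(field, scope_filter[key])
--               for key, field in key_to_field if key in scope_filter]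
--     if not checks:
--         return results
--     return [r for r in results if all(r.get(f) == v for f, v in checks)]
-- ===== Notes on version B (the rewrite author's own statement) =====
-- stated objective: simpler
-- what changed: B builds a list of (field, expected value) checks from the present filter keys and filters the results in one combined-predicate pass, instead of A's three sequential rebuild-the-list passes.
import Mathlib
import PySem

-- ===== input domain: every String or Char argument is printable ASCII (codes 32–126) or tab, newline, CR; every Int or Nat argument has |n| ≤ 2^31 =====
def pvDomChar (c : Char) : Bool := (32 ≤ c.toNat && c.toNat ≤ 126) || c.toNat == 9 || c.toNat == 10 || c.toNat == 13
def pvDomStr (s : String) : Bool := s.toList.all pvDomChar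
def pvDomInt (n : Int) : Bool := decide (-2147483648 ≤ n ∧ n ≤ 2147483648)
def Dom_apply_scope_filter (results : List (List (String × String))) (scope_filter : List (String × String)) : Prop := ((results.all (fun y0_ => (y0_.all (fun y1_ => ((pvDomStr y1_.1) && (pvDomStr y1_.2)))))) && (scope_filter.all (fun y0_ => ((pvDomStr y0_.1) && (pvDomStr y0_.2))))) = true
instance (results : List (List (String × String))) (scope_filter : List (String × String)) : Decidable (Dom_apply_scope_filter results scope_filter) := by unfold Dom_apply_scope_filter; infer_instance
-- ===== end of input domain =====

-- B replaces A's three sequential filter passes by one combined-predicate pass over a list of (field, value) checks; simpler decomposition, same cost.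


-- ===== PORT A =====
-- dict lookup on the association-list representation: first match, like Python's d.get(k)
def pvGetAssoc (d : List (String × String)) (k : String) : Option String :=
  (d.find? (fun p => p.1 == k)).map (fun p => p.2)

def apply_scope_filter (results : List (List (String × String))) (scope_filter : List (String × String)) : List (List (String × String)) :=
  let filtered := results
  let filtered :=
    match pvGetAssoc scope_filter "session_id" with
    | some session_id => filtered.filter (fun r => pvGetAssoc r "session" == some session_id)
    | none => filtered
  let filtered :=
    match pvGetAssoc scope_filter "section" with
    | some sec => filtered.filter (fun r => pvGetAssoc r "section" == some sec)
    | none => filtered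
  let filtered :=
    match pvGetAssoc scope_filter "episode_id" with
    | some episode_id => filtered.filter (fun r => pvGetAssoc r "episode_id" == some episode_id)
    | none => filtered
  filtered

-- ===== PORT B =====
def apply_scope_filter_alt (results : List (List (String × String))) (scope_filter : List (String × String)) : List (List (String × String)) :=
  let checks :=
    [("session_id", "session"), ("section", "section"), ("episode_id", "episode_id")].filterMap
      (fun kf => (pvGetAssoc scope_filter kf.1).map (fun v => (kf.2, v)))
  if checks = [] then results
  else results.filter (fun r => checks.all (fun fv => pvGetAssoc r fv.1 == some fv.2))

-- ===== PRECONDITION & SPEC =====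
def Spec_apply_scope_filter (results : List (List (String × String))) (scope_filter : List (String × String)) (out : List (List (String × String))) : Prop := out = apply_scope_filter_alt results scope_filter
instance (results : List (List (String × String))) (scope_filter : List (String × String)) (out : List (List (String × String))) : Decidable (Spec_apply_scope_filter results scope_filter out) := by unfold Spec_apply_scope_filter; infer_instance

-- ===== CLAIM (what is proved, stated in full; the proofs are below) =====
def Claim_equal_apply_scope_filter : Prop := ∀ (results : List (List (String × String))) (scope_filter : List (String × String)), Dom_apply_scope_filter results scope_filter → Spec_apply_scope_filter results scope_filter (apply_scope_filter results scope_filter)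

-- ===== LEMMAS AND PROOFS =====

-- ===== VERDICT (by name: the statement is the Claim_ definition above) =====
theorem apply_scope_filter_spec : Claim_equal_apply_scope_filter := by
  intro results scope_filter _
  unfold Spec_apply_scope_filter apply_scope_filter apply_scope_filter_alt
  rcases h1 : pvGetAssoc scope_filter "session_id" with _ | a <;>
    rcases h2 : pvGetAssoc scope_filter "section" with _ | b <;>
    rcases h3 : pvGetAssoc scope_filter "episode_id" with _ | c <;>
      simp only [h1, h2, h3, List.filterMap, Option.map_none, Option.map_some,
        List.filter_filter, reduceIte, List.all_cons, List.all_nil] <;>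
      refine List.filter_congr fun r _ => ?_ <;>
      simp [Bool.and_assoc, Bool.and_comm]
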